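-- pv_equiv track=rewrite | github.com/jjmgoss/autonomous-product-development | apd/evals/research_runner.py | _forbidden_claim_hits
-- ===== SOURCE A (Python) =====
-- def _forbidden_claim_hits(patterns: list[str], claims: list[str]) -> int:
--     lowered_claims = [claim.lower() for claim in claims]
--     hits = 0
--     for pattern in patterns:
--         lowered = pattern.lower()
--         if any(lowered in claim for claim in lowered_claims):
--             hits += 1
--     return hits
-- ===== SOURCE B (Python) =====
-- def _forbidden_claim_hits(patterns: list[str], claims: list[str]) -> int:
--     # One pass over the claims: keep the not-yet-matched lowered patterns in
--     # `pending`; each claim counts the pending patterns it contains and drops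
--     # them, so a matched pattern is never checked again.
--     pending = [p.lower() for p in patterns]
--     hits = 0
--     for claim in claims:
--         c = claim.lower()
--         still = []
--         for p in pending:
--             if p in c:
--                 hits += 1
--             else:
--                 still.append(p)
--         pending = still
--     return hits
-- ===== Notes on version B (the rewrite author's own statement) =====
-- stated objective: alternative
-- what changed: Loop order inverted: instead of scanning all claims for every pattern, B makes one pass over the claims with a shrinking 'pending' list, counting and removing the patterns each claim contains so matched patterns are never re-checked.
import Mathlib
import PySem

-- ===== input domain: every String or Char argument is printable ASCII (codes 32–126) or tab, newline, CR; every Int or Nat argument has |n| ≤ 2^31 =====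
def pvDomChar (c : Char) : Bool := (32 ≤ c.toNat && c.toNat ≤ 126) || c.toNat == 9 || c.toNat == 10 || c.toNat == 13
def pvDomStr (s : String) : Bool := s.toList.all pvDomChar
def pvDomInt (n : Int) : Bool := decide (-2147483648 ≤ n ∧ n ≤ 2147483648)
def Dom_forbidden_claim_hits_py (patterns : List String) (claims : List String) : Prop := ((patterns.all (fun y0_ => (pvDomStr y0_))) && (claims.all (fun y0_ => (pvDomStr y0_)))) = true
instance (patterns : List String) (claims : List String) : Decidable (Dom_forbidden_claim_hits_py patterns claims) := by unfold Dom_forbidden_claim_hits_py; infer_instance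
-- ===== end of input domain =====

-- B inverts the loop order: one pass over the claims with a shrinking list of
-- not-yet-matched lowered patterns (alternative decomposition, same worst-case cost).


-- ===== PORT A =====
def forbidden_claim_hits_py (patterns : List String) (claims : List String) : Int :=
  let lowered_claims := claims.map (fun claim => PySem.Str.lower claim)
  patterns.foldl
    (fun hits pattern =>
      let lowered := PySem.Str.lower pattern
      if lowered_claims.any (fun claim => PySem.Str.isIn lowered claim) then hits + 1 else hits)
    0

-- ===== PORT B =====
-- the inner 'for p in pending' loop of Source B, state = (hits, still)
def fchScan (c : String) (pending : List String) (st : Int × List String) : Int × List String :=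
  pending.foldl (fun s p => if PySem.Str.isIn p c then (s.1 + 1, s.2) else (s.1, s.2 ++ [p])) st

-- the outer 'for claim in claims' loop of Source B
def fchAltLoop : List String → List String → Int → Int
  | [], _pending, hits => hits
  | claim :: rest, pending, hits =>
      let c := PySem.Str.lower claim
      let st := fchScan c pending (hits, [])
      fchAltLoop rest st.2 st.1

def forbidden_claim_hits_py_alt (patterns : List String) (claims : List String) : Int :=
  fchAltLoop claims (patterns.map (fun p => PySem.Str.lower p)) 0

-- ===== PRECONDITION & SPEC =====
def Spec_forbidden_claim_hits_py (patterns : List String) (claims : List String) (out : Int) : Prop := out = forbidden_claim_hits_py_alt patterns claims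
instance (patterns : List String) (claims : List String) (out : Int) : Decidable (Spec_forbidden_claim_hits_py patterns claims out) := by unfold Spec_forbidden_claim_hits_py; infer_instance

-- ===== CLAIM (what is proved, stated in full; the proofs are below) =====
def Claim_equal_forbidden_claim_hits_py : Prop := ∀ (patterns : List String) (claims : List String), Dom_forbidden_claim_hits_py patterns claims → Spec_forbidden_claim_hits_py patterns claims (forbidden_claim_hits_py patterns claims)

-- ===== LEMMAS AND PROOFS =====

-- countP splits along a test: matches of q now plus matches of r among the survivors of q
theorem countP_or_split (l : List String) (q r : String → Bool) :
    (l.countP fun p => q p || r p) = l.countP q + (l.filter (fun p => !q p)).countP r := by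
  induction l with
  | nil => simp
  | cons x xs ih =>
      by_cases hq : q x = true <;>
        simp [List.countP_cons, hq, ih] <;> omega

-- the inner scan counts the matches and keeps the rest, in order
theorem fchScan_eq (c : String) (pending : List String) :
    ∀ (hits : Int) (still : List String),
      fchScan c pending (hits, still) =
        (hits + (pending.countP (fun p => PySem.Str.isIn p c) : Int),
         still ++ pending.filter (fun p => !PySem.Str.isIn p c)) := by
  induction pending with
  | nil => intro hits still; simp [fchScan]
  | cons x xs ih =>
      intro hits still
      simp only [fchScan, List.foldl_cons] at ih ⊢
      by_cases hx : PySem.Str.isIn x c = true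
      · rw [if_pos hx, ih, List.countP_cons, List.filter_cons]
        rw [PySem.Str.isIn_eq] at hx
        simp [hx]; ring
      · rw [if_neg hx, ih, List.countP_cons, List.filter_cons]
        rw [PySem.Str.isIn_eq] at hx
        simp [hx, List.append_assoc]

-- characterisation of B's loop: it adds the number of pending patterns found in some claim
theorem fchAltLoop_eq (claims : List String) :
    ∀ (pending : List String) (hits : Int),
      fchAltLoop claims pending hits =
        hits + (pending.countP (fun p => claims.any fun c => PySem.Str.isIn p (PySem.Str.lower c)) : Int) := by
  induction claims with
  | nil => intro pending hits; simp [fchAltLoop]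
  | cons claim rest ih =>
      intro pending hits
      simp only [fchAltLoop, fchScan_eq, List.nil_append, ih, List.any_cons]
      rw [countP_or_split pending (fun p => PySem.Str.isIn p (PySem.Str.lower claim))
            (fun p => rest.any fun c => PySem.Str.isIn p (PySem.Str.lower c))]
      push_cast
      ring

-- ===== VERDICT (by name: the statement is the Claim_ definition above) =====
theorem forbidden_claim_hits_py_spec : Claim_equal_forbidden_claim_hits_py := by
  intro patterns claims _
  show forbidden_claim_hits_py patterns claims = forbidden_claim_hits_py_alt patterns claims
  unfold forbidden_claim_hits_py forbidden_claim_hits_py_alt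
  rw [fchAltLoop_eq]
  rw [PySem.List.foldl_if_add_one
        (p := fun pattern => (claims.map fun claim => PySem.Str.lower claim).any
          (fun claim => PySem.Str.isIn (PySem.Str.lower pattern) claim))]
  simp only [List.countP_map, List.any_map, Function.comp_def]
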